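-- pv_equiv track=rewrite | github.com/rumman52/Shuddho | services/normalizer/shuddho_normalizer/normalizer.py | _collapse_spaces
-- ===== SOURCE A (Python) =====
-- PUNCTUATION_WITHOUT_LEADING_SPACE = {",", ".", ";", ":", "!", "?", "।"}
--
-- def _collapse_spaces(items: list[tuple[str, int]]) -> list[tuple[str, int]]:
--     normalized: list[tuple[str, int]] = []
--     pending_space: tuple[str, int] | None = None
--     for character, index in items:
--         if character == " ":
--             if pending_space is None:
--                 pending_space = (" ", index)
--             continue
--         if character == "\n":
--             pending_space = None
--             if normalized and normalized[-1][0] != "\n":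
--                 normalized.append((character, index))
--             continue
--         if pending_space is not None:
--             if character not in PUNCTUATION_WITHOUT_LEADING_SPACE and normalized and normalized[-1][0] != "\n":
--                 normalized.append(pending_space)
--             pending_space = None
--         normalized.append((character, index))
--     return normalized
-- ===== SOURCE B (Python) =====
-- PUNCTUATION_WITHOUT_LEADING_SPACE = {",", ".", ";", ":", "!", "?", "।"}
--
-- def _collapse_spaces(items: list[tuple[str, int]]) -> list[tuple[str, int]]:
--     # Phase 1: coalesce each maximal run of spaces into one space token
--     # carrying the first space's index.
--     groups: list[tuple[str, int]] = []
--     i = 0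
--     n = len(items)
--     while i < n:
--         ch, idx = items[i]
--         if ch == " ":
--             groups.append((" ", idx))
--             while i < n and items[i][0] == " ":
--                 i += 1
--         else:
--             groups.append((ch, idx))
--             i += 1
--     # Phase 2: walk the coalesced list with one-token look-ahead.
--     out: list[tuple[str, int]] = []
--     for k, (ch, idx) in enumerate(groups):
--         if ch == " ":
--             nxt = groups[k + 1][0] if k + 1 < len(groups) else None
--             if (out and out[-1][0] != "\n" and nxt is not None
--                     and nxt not in PUNCTUATION_WITHOUT_LEADING_SPACE and nxt != "\n"):
--                 out.append((ch, idx))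
--         elif ch == "\n":
--             if out and out[-1][0] != "\n":
--                 out.append((ch, idx))
--         else:
--             out.append((ch, idx))
--     return out
-- ===== Notes on version B (the rewrite author's own statement) =====
-- stated objective: alternative
-- what changed: Replaces A's single pass with a per-character pending-space accumulator by a two-phase algorithm: first coalesce each maximal run of spaces into one token keeping the first space's index, then a walk over the coalesced list that decides each space by one-token look-ahead at the next group.
import Mathlib
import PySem

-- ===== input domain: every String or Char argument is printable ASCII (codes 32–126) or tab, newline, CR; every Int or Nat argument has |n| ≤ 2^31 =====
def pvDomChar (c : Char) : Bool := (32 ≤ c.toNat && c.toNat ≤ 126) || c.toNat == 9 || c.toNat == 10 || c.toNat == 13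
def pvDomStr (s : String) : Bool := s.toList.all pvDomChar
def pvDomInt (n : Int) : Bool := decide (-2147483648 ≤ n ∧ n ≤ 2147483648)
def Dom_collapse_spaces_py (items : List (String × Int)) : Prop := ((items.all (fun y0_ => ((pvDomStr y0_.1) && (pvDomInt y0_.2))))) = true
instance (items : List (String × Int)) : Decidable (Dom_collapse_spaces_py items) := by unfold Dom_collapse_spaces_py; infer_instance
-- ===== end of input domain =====

-- B replaces A's per-character pending-space accumulator by a two-phase pass:
-- coalesce maximal space runs into single tokens, then a walk with one-token
-- look-ahead (objective: alternative decomposition, same cost).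

-- ===== PORT A =====
def pvPunct : List String := [",", ".", ";", ":", "!", "?", "।"]

-- `normalized and normalized[-1][0] != "\n"`
def pvLastOk (l : List (String × Int)) : Bool :=
  match l.getLast? with
  | some (c, _) => c != "\n"
  | none => false

def pvStepA (st : List (String × Int) × Option (String × Int)) (p : String × Int) :
    List (String × Int) × Option (String × Int) :=
  let normalized := st.1
  let pending := st.2
  let character := p.1
  let index := p.2
  if character = " " then
    (normalized, match pending with | none => some (" ", index) | some q => some q)
  else if character = "\n" then
    ((if pvLastOk normalized then normalized ++ [(character, index)] else normalized), none)
  else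
    let normalized' :=
      match pending with
      | some q =>
          if character ∉ pvPunct ∧ pvLastOk normalized then normalized ++ [q] else normalized
      | none => normalized
    (normalized' ++ [(character, index)], none)

def collapse_spaces_py (items : List (String × Int)) : List (String × Int) :=
  (items.foldl pvStepA ([], none)).1

-- ===== PORT B =====
-- inner `while` of phase 1: skip the rest of a space run
def pvSkipSpaces : List (String × Int) → List (String × Int)
  | [] => []
  | (c, i) :: rest => if c = " " then pvSkipSpaces rest else (c, i) :: rest

theorem pvSkipSpaces_len_le : ∀ l : List (String × Int), (pvSkipSpaces l).length ≤ l.length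
  | [] => le_refl _
  | (c, i) :: rest => by
      simp only [pvSkipSpaces]
      split
      · exact le_trans (pvSkipSpaces_len_le rest) (Nat.le_succ _)
      · simp

-- phase 1: coalesce each maximal run of spaces into one token (first index kept)
def pvGroup : List (String × Int) → List (String × Int)
  | [] => []
  | (c, i) :: rest =>
    if c = " " then (" ", i) :: pvGroup (pvSkipSpaces rest)
    else (c, i) :: pvGroup rest
termination_by l => l.length
decreasing_by
  · exact Nat.lt_succ_of_le (pvSkipSpaces_len_le rest)
  · simp

-- look-ahead test: next token exists, not punctuation, not a newline
def pvNextOk : Option (String × Int) → Bool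
  | some (n, _) => decide (n ∉ pvPunct) && n != "\n"
  | none => false

-- phase 2: walk with one-token look-ahead (`groups[k+1]` = head of the remaining list)
def pvWalk (out : List (String × Int)) : List (String × Int) → List (String × Int)
  | [] => out
  | (c, i) :: rest =>
    if c = " " then
      pvWalk (if pvLastOk out && pvNextOk rest.head? then out ++ [(c, i)] else out) rest
    else if c = "\n" then
      pvWalk (if pvLastOk out then out ++ [(c, i)] else out) rest
    else
      pvWalk (out ++ [(c, i)]) rest

def collapse_spaces_py_alt (items : List (String × Int)) : List (String × Int) :=
  pvWalk [] (pvGroup items)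

-- ===== PRECONDITION & SPEC =====
def Spec_collapse_spaces_py (items : List (String × Int)) (out : List (String × Int)) : Prop := out = collapse_spaces_py_alt items
instance (items : List (String × Int)) (out : List (String × Int)) : Decidable (Spec_collapse_spaces_py items out) := by unfold Spec_collapse_spaces_py; infer_instance

-- ===== CLAIM (what is proved, stated in full; the proofs are below) =====
def Claim_equal_collapse_spaces_py : Prop := ∀ (items : List (String × Int)), Dom_collapse_spaces_py items → Spec_collapse_spaces_py items (collapse_spaces_py items)

-- ===== LEMMAS AND PROOFS =====

-- A pending space corresponds to a space group prepended to the grouping of the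
-- remaining input with its leading spaces skipped.
def pvPendG : Option (String × Int) → List (String × Int) → List (String × Int)
  | none, items => pvGroup items
  | some p, items => p :: pvGroup (pvSkipSpaces items)

theorem pvSkipSpaces_cons_space (i : Int) (rest : List (String × Int)) :
    pvSkipSpaces ((" ", i) :: rest) = pvSkipSpaces rest := by
  simp [pvSkipSpaces]

theorem pvSkipSpaces_cons_nonspace (c : String) (i : Int) (rest : List (String × Int))
    (h : c ≠ " ") : pvSkipSpaces ((c, i) :: rest) = (c, i) :: rest := by
  simp [pvSkipSpaces, h]

theorem pvMain : ∀ (items : List (String × Int)) (norm : List (String × Int))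
    (pend : Option (String × Int)), (∀ q ∈ pend, q.1 = " ") →
    (items.foldl pvStepA (norm, pend)).1 = pvWalk norm (pvPendG pend items) := by
  intro items
  induction items with
  | nil =>
      intro norm pend hp
      match pend with
      | none => simp [pvPendG, pvGroup, pvWalk]
      | some (c, j) =>
          have hc : c = " " := hp (c, j) rfl
          subst hc
          simp [pvPendG, pvSkipSpaces, pvGroup, pvWalk, pvNextOk]
  | cons hd rest ih =>
      intro norm pend hp
      obtain ⟨c, i⟩ := hd
      by_cases hsp : c = " "
      · subst hsp
        match pend with
        | none =>
            have : pvPendG none ((" ", i) :: rest) = pvPendG (some (" ", i)) rest := by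
              simp [pvPendG, pvGroup]
            rw [List.foldl_cons, this]
            have h1 : pvStepA (norm, none) (" ", i) = (norm, some (" ", i)) := by
              simp [pvStepA]
            rw [h1]
            exact ih norm (some (" ", i)) (by intro q hq; simp at hq; exact hq ▸ rfl)
        | some (p, j) =>
            have hpc : p = " " := hp (p, j) rfl
            subst hpc
            have : pvPendG (some (" ", j)) ((" ", i) :: rest)
                 = pvPendG (some (" ", j)) rest := by
              simp [pvPendG, pvSkipSpaces_cons_space]
            rw [List.foldl_cons, this]
            have h1 : pvStepA (norm, some (" ", j)) (" ", i) = (norm, some (" ", j)) := by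
              simp [pvStepA]
            rw [h1]
            exact ih norm (some (" ", j)) (by intro q hq; simp at hq; exact hq ▸ rfl)
      · by_cases hnl : c = "\n"
        · subst hnl
          -- A: clear pending, append newline iff pvLastOk norm
          have h1 : pvStepA (norm, pend) ("\n", i)
              = ((if pvLastOk norm then norm ++ [("\n", i)] else norm), none) := by
            simp [pvStepA]
          rw [List.foldl_cons, h1]
          have hrec := ih (if pvLastOk norm then norm ++ [("\n", i)] else norm) none
            (by intro q hq; simp at hq)
          rw [hrec]
          match pend with
          | none =>
              simp only [pvPendG]
              rw [show pvGroup (("\n", i) :: rest) = ("\n", i) :: pvGroup rest by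
                   simp [pvGroup]]
              simp [pvWalk]
          | some (p, j) =>
              have hpc : p = " " := hp (p, j) rfl
              subst hpc
              simp only [pvPendG]
              rw [pvSkipSpaces_cons_nonspace _ _ _ hsp,
                  show pvGroup (("\n", i) :: rest) = ("\n", i) :: pvGroup rest by
                   simp [pvGroup]]
              -- look-ahead is the newline: space group dropped
              simp [pvWalk, pvNextOk]
        · -- ordinary character
          match pend with
          | none =>
              have h1 : pvStepA (norm, none) (c, i) = (norm ++ [(c, i)], none) := by
                simp [pvStepA, hsp, hnl]
              rw [List.foldl_cons, h1,
                  ih (norm ++ [(c, i)]) none (by intro q hq; simp at hq)]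
              simp only [pvPendG]
              rw [show pvGroup ((c, i) :: rest) = (c, i) :: pvGroup rest by
                   simp [pvGroup, hsp]]
              simp [pvWalk, hsp, hnl]
          | some (p, j) =>
              have hpc : p = " " := hp (p, j) rfl
              subst hpc
              have h1 : pvStepA (norm, some (" ", j)) (c, i)
                  = ((if c ∉ pvPunct ∧ pvLastOk norm then norm ++ [(" ", j)] else norm)
                      ++ [(c, i)], none) := by
                simp [pvStepA, hsp, hnl]
              rw [List.foldl_cons, h1,
                  ih _ none (by intro q hq; simp at hq)]
              simp only [pvPendG]
              rw [pvSkipSpaces_cons_nonspace _ _ _ hsp,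
                  show pvGroup ((c, i) :: rest) = (c, i) :: pvGroup rest by
                   simp [pvGroup, hsp]]
              -- look-ahead is (c, i); both sides test the same condition
              by_cases hpun : c ∈ pvPunct <;> by_cases hlast : pvLastOk norm = true <;>
                simp [pvWalk, pvNextOk, hsp, hnl, hpun, hlast]

-- ===== VERDICT (by name: the statement is the Claim_ definition above) =====
theorem collapse_spaces_py_spec : Claim_equal_collapse_spaces_py := by
  intro items _
  unfold Spec_collapse_spaces_py collapse_spaces_py collapse_spaces_py_alt
  rw [pvMain items [] none (by intro q hq; simp at hq)]
  rfl
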